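-- pv_equiv track=rewrite | github.com/Shashwath-K/login_analyzer_v2 | utils/helpers.py | compute_risk_scores
-- ===== SOURCE A (Python) =====
-- SEVERITY_WEIGHTS = {"INFO": 0, "LOW": 1, "MEDIUM": 2, "HIGH": 5, "CRITICAL": 10}
--
-- def compute_risk_scores(results: list[dict]) -> dict[str, dict]:
--     """Compute a per-source-IP risk score from a list of classified events.
--
--     Score is based on the sum of SEVERITY_WEIGHTS for each event from that IP.
--
--     Args:
--         results: List of event dicts, each containing 'src' and 'severity' keys.
--
--     Returns:
--         Dict mapping IP address → {'score': int, 'events': int}.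
--     """
--     scores: dict[str, dict] = {}
--     for r in results:
--         ip = r.get("src", "0.0.0.0")
--         if ip not in scores:
--             scores[ip] = {"score": 0, "events": 0}
--         scores[ip]["events"] += 1
--         scores[ip]["score"] += SEVERITY_WEIGHTS.get(r.get("severity", "INFO"), 0)
--     return scores
-- ===== SOURCE B (Python) =====
-- SEVERITY_WEIGHTS = {"INFO": 0, "LOW": 1, "MEDIUM": 2, "HIGH": 5, "CRITICAL": 10}
--
-- def compute_risk_scores(results: list[dict]) -> dict[str, dict]:
--     """Two-pass variant: first group severities by source IP, then aggregate."""
--     groups: dict[str, list[str]] = {}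
--     for r in results:
--         groups.setdefault(r.get("src", "0.0.0.0"), []).append(r.get("severity", "INFO"))
--     return {ip: {"score": sum(SEVERITY_WEIGHTS.get(s, 0) for s in sevs),
--                  "events": len(sevs)}
--             for ip, sevs in groups.items()}
-- ===== Notes on version B (the rewrite author's own statement) =====
-- stated objective: alternative
-- what changed: replaces A's incremental per-event score/count accumulation in a nested dict with a two-pass shape: first group each IP's severities into a dict of lists, then a second pass aggregates each group into {'score','events'}
import Mathlib
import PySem

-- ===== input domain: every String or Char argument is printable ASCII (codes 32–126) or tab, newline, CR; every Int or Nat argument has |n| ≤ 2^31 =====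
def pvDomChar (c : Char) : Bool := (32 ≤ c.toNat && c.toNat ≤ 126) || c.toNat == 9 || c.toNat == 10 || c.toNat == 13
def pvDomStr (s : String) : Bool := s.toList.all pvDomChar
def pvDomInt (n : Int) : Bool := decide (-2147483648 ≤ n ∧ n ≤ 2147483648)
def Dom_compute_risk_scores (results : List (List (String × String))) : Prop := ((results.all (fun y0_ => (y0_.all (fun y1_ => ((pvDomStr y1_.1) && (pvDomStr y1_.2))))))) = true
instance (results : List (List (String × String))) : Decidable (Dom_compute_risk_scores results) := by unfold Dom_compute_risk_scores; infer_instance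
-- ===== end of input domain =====

-- B replaces A's incremental accumulation with a group-by-IP pass followed by an aggregation pass (alternative decomposition, same cost).

-- shared constant: SEVERITY_WEIGHTS
def pvWeights : PySem.Dict String Int :=
  PySem.Dict.mk [("INFO", 0), ("LOW", 1), ("MEDIUM", 2), ("HIGH", 5), ("CRITICAL", 10)]

-- r.get(k, dflt) on an event dict
def pvGetStr (r : List (String × String)) (k dflt : String) : String :=
  (PySem.Dict.mk r).getD k dflt

-- ===== PORT A =====
-- loop body of A: conditional fresh insert, then scores[ip]["events"] += 1; scores[ip]["score"] += weight
def pvStepA (scores : PySem.Dict String (PySem.Dict String Int)) (r : List (String × String)) :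
    PySem.Dict String (PySem.Dict String Int) :=
  let ip := pvGetStr r "src" "0.0.0.0"
  let scores := if scores.contains ip then scores
                else scores.insert ip (PySem.Dict.mk [("score", 0), ("events", 0)])
  let scores := scores.modify ip PySem.Dict.empty (fun d => d.modify "events" 0 (· + 1))
  scores.modify ip PySem.Dict.empty
    (fun d => d.modify "score" 0 (· + pvWeights.getD (pvGetStr r "severity" "INFO") 0))

def compute_risk_scores (results : List (List (String × String))) : List (String × List (String × Int)) :=
  (results.foldl pvStepA PySem.Dict.empty).items.map (fun p => (p.1, p.2.items))

-- ===== PORT B =====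
-- grouping pass: groups.setdefault(ip, []).append(sev)
def pvStepB (g : PySem.Dict String (List String)) (r : List (String × String)) :
    PySem.Dict String (List String) :=
  g.modify (pvGetStr r "src" "0.0.0.0") [] (· ++ [pvGetStr r "severity" "INFO"])

-- sum(SEVERITY_WEIGHTS.get(s, 0) for s in sevs)
def pvWSum (sevs : List String) : Int :=
  sevs.foldl (fun acc s => acc + pvWeights.getD s 0) 0

def compute_risk_scores_alt (results : List (List (String × String))) : List (String × List (String × Int)) :=
  (results.foldl pvStepB PySem.Dict.empty).items.map
    (fun p => (p.1, [("score", pvWSum p.2), ("events", (p.2.length : Int))]))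

-- ===== PRECONDITION & SPEC =====
def Spec_compute_risk_scores (results : List (List (String × String))) (out : List (String × List (String × Int))) : Prop := out = compute_risk_scores_alt results
instance (results : List (List (String × String))) (out : List (String × List (String × Int))) : Decidable (Spec_compute_risk_scores results out) := by unfold Spec_compute_risk_scores; infer_instance

-- ===== CLAIM (what is proved, stated in full; the proofs are below) =====
def Claim_equal_compute_risk_scores : Prop := ∀ (results : List (List (String × String))), Dom_compute_risk_scores results → Spec_compute_risk_scores results (compute_risk_scores results)

-- ===== LEMMAS AND PROOFS =====

-- A's accumulator is B's accumulator with each severity group replaced by its aggregate inner dict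
def pvF (p : String × List String) : String × PySem.Dict String Int :=
  (p.1, PySem.Dict.mk [("score", pvWSum p.2), ("events", (p.2.length : Int))])

theorem pvWSum_append_singleton (l : List String) (s : String) :
    pvWSum (l ++ [s]) = pvWSum l + pvWeights.getD s 0 := by
  simp [pvWSum, List.foldl_append]

theorem pv_contains_map (g : PySem.Dict String (List String)) (ip : String) :
    (PySem.Dict.mk (g.items.map pvF)).contains ip = g.contains ip := by
  simp only [PySem.Dict.contains, List.any_map]
  rfl

theorem pv_step (g : PySem.Dict String (List String)) (r : List (String × String)) :
    pvStepA (PySem.Dict.mk (g.items.map pvF)) r = PySem.Dict.mk ((pvStepB g r).items.map pvF) := by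
  unfold pvStepA pvStepB
  generalize pvGetStr r "src" "0.0.0.0" = ip
  generalize pvGetStr r "severity" "INFO" = sev
  by_cases hc : g.contains ip = true
  · -- ip already present in the accumulator
    have h0 : (PySem.Dict.mk (g.items.map pvF)).contains ip = true := by
      rw [pv_contains_map]; exact hc
    have hsome : (g.get? ip).isSome := by
      rw [PySem.Dict.contains_eq_isSome_get?] at hc; exact hc
    obtain ⟨sevs, hg⟩ := Option.isSome_iff_exists.mp hsome
    obtain ⟨q, hq, hq2⟩ : ∃ q, g.items.find? (fun p => p.1 == ip) = some q ∧ q.2 = sevs := by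
      have h := hg
      unfold PySem.Dict.get? at h
      cases hf : g.items.find? (fun p => p.1 == ip) with
      | none => rw [hf] at h; simp at h
      | some q => rw [hf] at h; simp at h; exact ⟨q, rfl, h⟩
    have hA0 : (PySem.Dict.mk (g.items.map pvF)).get? ip
        = some (PySem.Dict.mk [("score", pvWSum sevs), ("events", (sevs.length : Int))]) := by
      unfold PySem.Dict.get?
      have hcomp : (g.items.map pvF).find? (fun p => p.1 == ip)
          = Option.map pvF (g.items.find? (fun p => p.1 == ip)) := List.find?_map ..
      rw [PySem.Dict.items, hcomp, hq]
      simp [pvF, hq2]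
    simp only [h0, if_true]
    simp only [PySem.Dict.modify, PySem.Dict.getD_eq_get?_getD, hA0, hg, Option.getD_some,
      PySem.Dict.get?_insert_self, PySem.Dict.insert_insert_self]
    have hE : (PySem.Dict.mk [("score", pvWSum sevs), ("events", (sevs.length : Int))]).insert
          "events"
          (((PySem.Dict.mk [("score", pvWSum sevs), ("events", (sevs.length : Int))]).get?
                "events").getD 0 + 1)
        = PySem.Dict.mk [("score", pvWSum sevs), ("events", (sevs.length : Int) + 1)] := by
      simp [PySem.Dict.insert, PySem.Dict.contains, PySem.Dict.get?]
    rw [hE]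
    have hS : (PySem.Dict.mk [("score", pvWSum sevs), ("events", (sevs.length : Int) + 1)]).insert
          "score"
          (((PySem.Dict.mk [("score", pvWSum sevs),
                ("events", (sevs.length : Int) + 1)]).get? "score").getD 0
            + (pvWeights.get? sev).getD 0)
        = PySem.Dict.mk [("score", pvWSum sevs + (pvWeights.get? sev).getD 0),
            ("events", (sevs.length : Int) + 1)] := by
      simp [PySem.Dict.insert, PySem.Dict.contains, PySem.Dict.get?]
    rw [hS]
    apply PySem.Dict.ext
    rw [PySem.Dict.items_insert, PySem.Dict.items_insert, h0, hc]
    simp only [if_true, List.map_map]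
    refine List.map_congr_left ?_
    intro p hp
    by_cases hip : p.1 = ip
    · simp [Function.comp, pvF, hip, pvWSum_append_singleton, PySem.Dict.getD_eq_get?_getD]
    · simp [Function.comp, pvF, hip]
  · -- ip not yet present
    have hc' : g.contains ip = false := by simpa using hc
    have h0 : (PySem.Dict.mk (g.items.map pvF)).contains ip = false := by
      rw [pv_contains_map]; exact hc'
    have hgn : g.get? ip = none := by
      cases h : g.get? ip with
      | none => rfl
      | some v => rw [PySem.Dict.contains_eq_isSome_get?, h] at hc'; simp at hc'
    simp only [h0, Bool.false_eq_true, if_false]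
    simp only [PySem.Dict.modify, PySem.Dict.getD_eq_get?_getD, hgn, Option.getD_none,
      PySem.Dict.get?_insert_self, Option.getD_some, PySem.Dict.insert_insert_self]
    have hE0 : (PySem.Dict.mk [("score", (0 : Int)), ("events", 0)]).insert "events"
          (((PySem.Dict.mk [("score", (0 : Int)), ("events", 0)]).get? "events").getD 0 + 1)
        = PySem.Dict.mk [("score", 0), ("events", 1)] := by decide
    rw [hE0]
    have hS0 : (PySem.Dict.mk [("score", (0 : Int)), ("events", 1)]).insert "score"
          (((PySem.Dict.mk [("score", (0 : Int)), ("events", 1)]).get? "score").getD 0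
            + (pvWeights.get? sev).getD 0)
        = PySem.Dict.mk [("score", 0 + (pvWeights.get? sev).getD 0), ("events", 1)] := by
      simp [PySem.Dict.insert, PySem.Dict.contains, PySem.Dict.get?]
    rw [hS0]
    apply PySem.Dict.ext
    rw [PySem.Dict.items_insert, PySem.Dict.items_insert, h0, hc']
    simp [pvF, pvWSum, List.map_append, PySem.Dict.getD_eq_get?_getD]

theorem pv_fold (l : List (List (String × String))) (g : PySem.Dict String (List String)) :
    l.foldl pvStepA (PySem.Dict.mk (g.items.map pvF))
      = PySem.Dict.mk ((l.foldl pvStepB g).items.map pvF) := by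
  induction l generalizing g with
  | nil => rfl
  | cons r t ih => simpa [List.foldl_cons, pv_step] using ih (pvStepB g r)

-- ===== VERDICT (by name: the statement is the Claim_ definition above) =====
theorem compute_risk_scores_spec : Claim_equal_compute_risk_scores := by
  intro results _
  show compute_risk_scores results = compute_risk_scores_alt results
  have h := pv_fold results PySem.Dict.empty
  unfold compute_risk_scores compute_risk_scores_alt
  rw [show (PySem.Dict.empty : PySem.Dict String (PySem.Dict String Int))
        = PySem.Dict.mk ((PySem.Dict.empty : PySem.Dict String (List String)).items.map pvF) from rfl, h]
  simp [List.map_map, pvF, Function.comp]
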